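-- pv_equiv track=rewrite | github.com/jonnyjohnson1/topos-cli | topos/FC/ontological_feature_detection.py | parse_mermaid
-- ===== SOURCE A (Python) =====
-- def parse_mermaid(input_text):
--     lines = input_text.strip().split("\n")
--     nodes = {}
--     edges = []
--
--     for line in lines:
--         if "-->" in line:
--             parts = line.split("-->")
--             parent = parts[0].strip()
--             child = parts[1].strip()
--             edges.append((parent, child))
--             if parent not in nodes:
--                 nodes[parent] = parent
--             if child not in nodes:
--                 nodes[child] = child
--         elif "graph" not in line and "[" in line:
--             node_id, node_label = line.split("[")
--             node_label = node_label.rstrip("]").strip().strip('"')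
--             nodes[node_id.strip()] = node_label
--
--     return nodes, edges
-- ===== SOURCE B (Python) =====
-- def _edge_parts(line):
--     parts = line.split("-->")
--     return (parts[0].strip(), parts[1].strip())
--
--
-- def _node_def(line):
--     node_id, node_label = line.split("[")
--     return (node_id.strip(), node_label.rstrip("]").strip().strip('"'))
--
--
-- def _is_edge(line):
--     return "-->" in line
--
--
-- def _is_node(line):
--     return "-->" not in line and "graph" not in line and "[" in line
--
--
-- def parse_mermaid(input_text):
--     lines = input_text.strip().split("\n")
--     # pass 1: the edge list
--     edges = [_edge_parts(l) for l in lines if _is_edge(l)]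
--     # pass 2: last-wins label table from node-definition lines
--     labels = dict(_node_def(l) for l in lines if _is_node(l))
--     # node ids in first-encounter order (edge endpoints and definition ids alike)
--     occ = [k for l in lines
--            for k in (list(_edge_parts(l)) if _is_edge(l)
--                      else [_node_def(l)[0]] if _is_node(l)
--                      else [])]
--     nodes = {}
--     for k in occ:
--         if k not in nodes:
--             nodes[k] = labels.get(k, k)
--     return nodes, edges
-- ===== Notes on version B (the rewrite author's own statement) =====
-- stated objective: alternative
-- what changed: A's single stateful loop interleaving dict mutation is replaced by a pipeline decomposition: one comprehension for edges, a last-wins label table from node-definition lines, a flattened first-occurrence key list, and a final dedup pass assembling the nodes dict from the table.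
import Mathlib
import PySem

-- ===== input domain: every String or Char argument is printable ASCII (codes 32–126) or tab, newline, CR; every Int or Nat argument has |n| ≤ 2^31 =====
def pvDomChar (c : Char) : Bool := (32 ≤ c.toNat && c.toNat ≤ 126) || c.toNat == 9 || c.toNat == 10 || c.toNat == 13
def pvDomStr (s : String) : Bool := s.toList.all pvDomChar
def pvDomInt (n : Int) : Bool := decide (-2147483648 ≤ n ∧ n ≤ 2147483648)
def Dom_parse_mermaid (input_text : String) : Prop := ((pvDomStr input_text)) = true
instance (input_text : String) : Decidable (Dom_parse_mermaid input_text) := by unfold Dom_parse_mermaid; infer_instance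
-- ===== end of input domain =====

-- B replaces A's single stateful loop by a pipeline (edges / label table / key occurrences / final dedup
-- assembly); equivalence is about the RETURN value (neither version mutates its argument).

-- ===== PORT A =====
-- hand port of s.rstrip("]") (PySem has no rstrip-with-chars): drop trailing ']' characters; exact,
-- since the stripped set is the single character ']'
def pvRstripBracketA (s : String) : String :=
  String.ofList ((s.toList.reverse.dropWhile (fun c => c == ']')).reverse)
def parse_mermaid (input_text : String) : (List (String × String)) × (List (String × String)) :=
  -- lines = input_text.strip().split("\n")   (sep "\n" ≠ "", so split? is never none)
  let lines := (PySem.Str.split? (PySem.Str.strip input_text) "\n").getD []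
  let st := lines.foldl (fun (st : PySem.Dict String String × List (String × String)) line =>
    if PySem.Str.isIn "-->" line then
      let parts := (PySem.Str.split? line "-->").getD []
      let parent := PySem.Str.strip (parts.getD 0 "")
      let child := PySem.Str.strip (parts.getD 1 "")
      let edges := st.2 ++ [(parent, child)]
      let nodes := if st.1.contains parent then st.1 else st.1.insert parent parent
      let nodes := if nodes.contains child then nodes else nodes.insert child child
      (nodes, edges)
    else if !(PySem.Str.isIn "graph" line) && PySem.Str.isIn "[" line then
      let parts := (PySem.Str.split? line "[").getD []
      -- node_id, node_label = line.split("["): 2-tuple unpacking, exact when there are two parts;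
      -- Python raises ValueError otherwise (excluded by Pre_)
      if parts.length = 2 then
        let node_id := parts.getD 0 ""
        -- node_label.rstrip("]").strip().strip('"')
        let node_label := PySem.Str.stripChars (PySem.Str.strip (pvRstripBracketA (parts.getD 1 ""))) "\""
        (st.1.insert (PySem.Str.strip node_id) node_label, st.2)
      else st
    else st) (PySem.Dict.mk [], [])
  (st.1.items, st.2)

-- ===== PORT B =====
-- hand port of s.rstrip("]") for B's _node_def, same single-character set (B-side copy: the two
-- ports may not share helpers)
def pvRstripBracket (s : String) : String :=
  String.ofList ((s.toList.reverse.dropWhile (fun c => c == ']')).reverse)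
def pvIsEdge (line : String) : Bool := PySem.Str.isIn "-->" line

def pvIsNode (line : String) : Bool :=
  !(PySem.Str.isIn "-->" line) && !(PySem.Str.isIn "graph" line) && PySem.Str.isIn "[" line

def pvEdgeParts (line : String) : String × String :=
  let parts := (PySem.Str.split? line "-->").getD []
  (PySem.Str.strip (parts.getD 0 ""), PySem.Str.strip (parts.getD 1 ""))

def pvNodeDef (line : String) : String × String :=
  let parts := (PySem.Str.split? line "[").getD []
  if parts.length = 2 then  -- 2-tuple unpacking; Python raises ValueError otherwise (excluded by Pre_)
    (PySem.Str.strip (parts.getD 0 ""),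
     PySem.Str.stripChars (PySem.Str.strip (pvRstripBracket (parts.getD 1 ""))) "\"")
  else ("", "")

def parse_mermaid_alt (input_text : String) : (List (String × String)) × (List (String × String)) :=
  let lines := (PySem.Str.split? (PySem.Str.strip input_text) "\n").getD []
  let edges := (lines.filter pvIsEdge).map pvEdgeParts
  let labels := (lines.filter pvIsNode).foldl
    (fun d l => d.insert (pvNodeDef l).1 (pvNodeDef l).2) (PySem.Dict.mk [])
  let occ := lines.flatMap (fun l =>
    if pvIsEdge l then [(pvEdgeParts l).1, (pvEdgeParts l).2]
    else if pvIsNode l then [(pvNodeDef l).1] else [])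
  let nodes := occ.foldl (fun d k => if d.contains k then d else d.insert k (labels.getD k k))
    (PySem.Dict.mk [])
  (nodes.items, edges)

-- ===== PRECONDITION & SPEC =====
-- Pre_ excludes exactly the inputs on which BOTH programs raise ValueError: a line that is not an
-- edge line, does not contain "graph", and contains more than one '[' (so line.split("[") does not
-- have exactly two parts and Python's 2-tuple unpacking fails, in A and in B alike).
def Pre_parse_mermaid (input_text : String) : Prop :=
  ∀ line ∈ (PySem.Str.split? (PySem.Str.strip input_text) "\n").getD [],
    PySem.Str.isIn "-->" line = true ∨ PySem.Str.isIn "graph" line = true ∨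
    ¬ (PySem.Str.isIn "[" line = true) ∨ ((PySem.Str.split? line "[").getD []).length = 2
instance (input_text : String) : Decidable (Pre_parse_mermaid input_text) := by
  unfold Pre_parse_mermaid; infer_instance

def pvWitness_parse_mermaid : String := "graph TD\n  a[Start] --> b\n  b[\"End\"]"

def Spec_parse_mermaid (input_text : String) (out : (List (String × String)) × (List (String × String))) : Prop := out = parse_mermaid_alt input_text
instance (input_text : String) (out : (List (String × String)) × (List (String × String))) : Decidable (Spec_parse_mermaid input_text out) := by unfold Spec_parse_mermaid; infer_instance

-- ===== CLAIM (what is proved, stated in full; the proofs are below) =====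
def Claim_equal_parse_mermaid : Prop := ∀ (input_text : String), Dom_parse_mermaid input_text → Pre_parse_mermaid input_text → Spec_parse_mermaid input_text (parse_mermaid input_text)

-- ===== LEMMAS AND PROOFS =====

-- proof-side names for the two loop bodies and B's intermediate lists
def pvStepA (st : PySem.Dict String String × List (String × String)) (line : String) :
    PySem.Dict String String × List (String × String) :=
  if PySem.Str.isIn "-->" line then
    let parts := (PySem.Str.split? line "-->").getD []
    let parent := PySem.Str.strip (parts.getD 0 "")
    let child := PySem.Str.strip (parts.getD 1 "")
    let edges := st.2 ++ [(parent, child)]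
    let nodes := if st.1.contains parent then st.1 else st.1.insert parent parent
    let nodes := if nodes.contains child then nodes else nodes.insert child child
    (nodes, edges)
  else if !(PySem.Str.isIn "graph" line) && PySem.Str.isIn "[" line then
    let parts := (PySem.Str.split? line "[").getD []
    if parts.length = 2 then
      let node_id := parts.getD 0 ""
      let node_label := PySem.Str.stripChars (PySem.Str.strip (pvRstripBracketA (parts.getD 1 ""))) "\""
      (st.1.insert (PySem.Str.strip node_id) node_label, st.2)
    else st
  else st

def pvKeysOf (l : String) : List String :=
  if pvIsEdge l then [(pvEdgeParts l).1, (pvEdgeParts l).2]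
  else if pvIsNode l then [(pvNodeDef l).1] else []

def pvLabels (ls : List String) : PySem.Dict String String :=
  (ls.filter pvIsNode).foldl (fun d l => d.insert (pvNodeDef l).1 (pvNodeDef l).2) (PySem.Dict.mk [])

def pvBuild (labels : PySem.Dict String String) (occ : List String) : PySem.Dict String String :=
  occ.foldl (fun d k => if d.contains k then d else d.insert k (labels.getD k k)) (PySem.Dict.mk [])

lemma pv_beq_decide (a k : String) : (a == k) = decide (k = a) := by
  by_cases h : k = a
  · simp [h]
  · simp only [h, decide_false]
    simp only [beq_eq_false_iff_ne, ne_eq]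
    exact fun hh => h hh.symm
lemma pv_any_beq (S : List String) (k : String) : (S.any fun x => x == k) = decide (k ∈ S) := by
  induction S with
  | nil => simp
  | cons a t ih =>
    rw [List.any_cons, ih, pv_beq_decide]
    simp [Bool.decide_or]
lemma pv_contains_mk_map (S : List String) (g : String → String) (k : String) :
    (PySem.Dict.mk (S.map (fun j => (j, g j)))).contains k = decide (k ∈ S) := by
  simp only [PySem.Dict.contains, List.any_map]
  simp only [Function.comp_def]
  exact pv_any_beq S k

lemma pv_add_of_mem {S : PySem.Set String} {k : String} (h : k ∈ S) :
    PySem.Set.add S k = S := by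
  simpa [PySem.Set.add] using h

lemma pv_add_of_not_mem {S : PySem.Set String} {k : String} (h : ¬ k ∈ S) :
    PySem.Set.add S k = S ++ [k] := by
  simpa [PySem.Set.add] using h

lemma pv_ofList_snoc (K : List String) (k : String) :
    PySem.Set.ofList (K ++ [k]) = PySem.Set.add (PySem.Set.ofList K) k := by
  rw [PySem.Set.ofList_eq_foldl, PySem.Set.ofList_eq_foldl, List.foldl_append]
  rfl

lemma pvBuild_eq (labels : PySem.Dict String String) (occ : List String) :
    pvBuild labels occ =
      PySem.Dict.mk ((PySem.Set.ofList occ).map (fun k => (k, labels.getD k k))) := by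
  induction occ using List.reverseRecOn with
  | nil => rfl
  | append_singleton K k ih =>
    unfold pvBuild at ih ⊢
    rw [List.foldl_append, ih, pv_ofList_snoc]
    simp only [List.foldl_cons, List.foldl_nil]
    by_cases hk : k ∈ PySem.Set.ofList K
    · rw [pv_contains_mk_map]
      simp only [hk, decide_true, if_true, pv_add_of_mem hk]
    · rw [pv_contains_mk_map]
      simp only [hk, decide_false, Bool.false_eq_true, if_false, pv_add_of_not_mem hk]
      apply PySem.Dict.ext
      rw [PySem.Dict.items_insert_of_not_contains _ _ (by rw [pv_contains_mk_map]; simp [hk])]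
      simp

lemma pvBuild_snoc_id (labels : PySem.Dict String String) (K : List String) (k : String)
    (hk : labels.contains k = true → k ∈ K) :
    (if (pvBuild labels K).contains k then pvBuild labels K
     else (pvBuild labels K).insert k k) = pvBuild labels (K ++ [k]) := by
  rw [pvBuild_eq, pvBuild_eq, pv_ofList_snoc]
  rw [pv_contains_mk_map]
  by_cases hmem : k ∈ K
  · have hS : k ∈ PySem.Set.ofList K := (PySem.Set.mem_ofList K k).2 hmem
    simp only [hS, decide_true, if_true, pv_add_of_mem hS]
  · have hS : ¬ k ∈ PySem.Set.ofList K := fun h => hmem ((PySem.Set.mem_ofList K k).1 h)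
    simp only [hS, decide_false, Bool.false_eq_true, if_false, pv_add_of_not_mem hS]
    have hlc : labels.contains k = false := by
      cases hc : labels.contains k
      · rfl
      · exact absurd (hk hc) hmem
    apply PySem.Dict.ext
    rw [PySem.Dict.items_insert_of_not_contains _ _ (by rw [pv_contains_mk_map]; simp [hS])]
    simp [List.map_append, PySem.Dict.getD_of_not_contains _ _ hlc]

lemma pvBuild_insert (labels : PySem.Dict String String) (K : List String) (k v : String) :
    pvBuild (labels.insert k v) (K ++ [k]) = (pvBuild labels K).insert k v := by
  rw [pvBuild_eq, pvBuild_eq, pv_ofList_snoc]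
  by_cases hmem : k ∈ PySem.Set.ofList K
  · rw [pv_add_of_mem hmem]
    apply PySem.Dict.ext
    rw [PySem.Dict.items_insert_of_contains _ _ (by rw [pv_contains_mk_map]; simp [hmem])]
    rw [List.map_map]
    apply List.map_congr_left
    intro j _
    by_cases hj : j = k
    · subst hj
      simp [PySem.Dict.getD_insert_self]
    · simp only [Function.comp_def, pv_beq_decide, PySem.Dict.getD_insert_of_ne _ _ _ hj,
        decide_eq_false (show ¬ k = j from fun h => hj h.symm), Bool.false_eq_true, if_false]
  · rw [pv_add_of_not_mem hmem]
    apply PySem.Dict.ext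
    rw [PySem.Dict.items_insert_of_not_contains _ _ (by rw [pv_contains_mk_map]; simp [hmem])]
    dsimp only
    rw [List.map_append]
    congr 1
    · apply List.map_congr_left
      intro j hj
      have hne : j ≠ k := fun h => hmem (h ▸ hj)
      simp [PySem.Dict.getD_insert_of_ne _ _ _ hne]
    · simp [PySem.Dict.getD_insert_self]

lemma pvStepA_edge (st : PySem.Dict String String × List (String × String)) (l : String)
    (he : PySem.Str.isIn "-->" l = true) :
    pvStepA st l =
      ((fun B1 => if B1.contains (pvEdgeParts l).2 then B1 else B1.insert (pvEdgeParts l).2 (pvEdgeParts l).2)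
        (if st.1.contains (pvEdgeParts l).1 then st.1 else st.1.insert (pvEdgeParts l).1 (pvEdgeParts l).1),
       st.2 ++ [pvEdgeParts l]) := by
  unfold pvStepA
  rw [if_pos he]
  rfl

lemma pvStepA_node (st : PySem.Dict String String × List (String × String)) (l : String)
    (he : PySem.Str.isIn "-->" l = false) (hg : PySem.Str.isIn "graph" l = false)
    (hb : PySem.Str.isIn "[" l = true)
    (h2 : ((PySem.Str.split? l "[").getD []).length = 2) :
    pvStepA st l = (st.1.insert (pvNodeDef l).1 (pvNodeDef l).2, st.2) := by
  unfold pvStepA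
  rw [if_neg (by rw [he]; simp), if_pos (by rw [hg, hb]; rfl), if_pos h2]
  simp only [pvNodeDef]
  rw [if_pos h2]
  rfl  -- pvRstripBracketA and pvRstripBracket have identical bodies

lemma pvStepA_skip (st : PySem.Dict String String × List (String × String)) (l : String)
    (he : PySem.Str.isIn "-->" l = false)
    (hskip : PySem.Str.isIn "graph" l = true ∨ PySem.Str.isIn "[" l = false) :
    pvStepA st l = st := by
  unfold pvStepA
  rw [if_neg (by rw [he]; simp), if_neg (by rcases hskip with h | h <;> rw [h] <;> simp)]

lemma pvIsNode_of_edge (l : String) (he : PySem.Str.isIn "-->" l = true) : pvIsNode l = false := by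
  unfold pvIsNode; rw [he]; rfl

lemma pvLabels_append (t : List String) (l : String) :
    pvLabels (t ++ [l]) =
      (if pvIsNode l then (pvLabels t).insert (pvNodeDef l).1 (pvNodeDef l).2 else pvLabels t) := by
  unfold pvLabels
  rw [List.filter_append, List.foldl_append]
  by_cases hn : pvIsNode l <;> simp [hn]

lemma pvLabels_sub (ls : List String) (k : String)
    (h : (pvLabels ls).contains k = true) : k ∈ ls.flatMap pvKeysOf := by
  induction ls using List.reverseRecOn with
  | nil => simp [pvLabels, PySem.Dict.contains] at h
  | append_singleton t l ih =>
    rw [List.flatMap_append]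
    rw [pvLabels_append] at h
    by_cases hn : pvIsNode l
    · rw [if_pos hn, PySem.Dict.contains_insert] at h
      rcases Bool.or_eq_true_iff.1 h with h1 | h1
      · have hk : k = (pvNodeDef l).1 := by simpa using h1
        apply List.mem_append_right
        have hne : pvIsEdge l = false := by
          unfold pvIsNode at hn
          unfold pvIsEdge
          cases hi : PySem.Str.isIn "-->" l
          · rfl
          · rw [hi] at hn; simp at hn
        simp [pvKeysOf, hne, hn, hk]
      · exact List.mem_append_left _ (ih h1)
    · rw [if_neg hn] at h
      exact List.mem_append_left _ (ih h)

lemma pvMain (ls : List String)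
    (hpre : ∀ l ∈ ls, PySem.Str.isIn "-->" l = true ∨ PySem.Str.isIn "graph" l = true ∨
      ¬ (PySem.Str.isIn "[" l = true) ∨ ((PySem.Str.split? l "[").getD []).length = 2) :
    ls.foldl pvStepA (PySem.Dict.mk [], []) =
      (pvBuild (pvLabels ls) (ls.flatMap pvKeysOf), (ls.filter pvIsEdge).map pvEdgeParts) := by
  induction ls using List.reverseRecOn with
  | nil => rfl
  | append_singleton t l ih =>
    have hpret : ∀ x ∈ t, _ := fun x hx => hpre x (List.mem_append_left _ hx)
    rw [List.foldl_append, ih hpret]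
    simp only [List.foldl_cons, List.foldl_nil]
    rw [List.flatMap_append, List.filter_append, pvLabels_append]
    simp only [List.flatMap_cons, List.flatMap_nil, List.append_nil, List.filter_cons,
      List.filter_nil]
    by_cases he : PySem.Str.isIn "-->" l = true
    · -- edge line: two conditional id-inserts = two snocs on the occurrence list
      have hie : pvIsEdge l = true := he
      have hnod : pvIsNode l = false := pvIsNode_of_edge l he
      rw [pvStepA_edge _ _ he, hnod, hie]
      simp only [Bool.false_eq_true, if_false, if_true, List.map_append, List.map_cons,
        List.map_nil]
      rw [show pvKeysOf l = [(pvEdgeParts l).1, (pvEdgeParts l).2] from by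
        unfold pvKeysOf; rw [hie]; rfl]
      have h1 := pvBuild_snoc_id (pvLabels t) (t.flatMap pvKeysOf) (pvEdgeParts l).1
        (fun hc => pvLabels_sub t _ hc)
      have h2 := pvBuild_snoc_id (pvLabels t) (t.flatMap pvKeysOf ++ [(pvEdgeParts l).1])
        (pvEdgeParts l).2 (fun hc => List.mem_append_left _ (pvLabels_sub t _ hc))
      rw [show t.flatMap pvKeysOf ++ [(pvEdgeParts l).1, (pvEdgeParts l).2] =
        (t.flatMap pvKeysOf ++ [(pvEdgeParts l).1]) ++ [(pvEdgeParts l).2] from by simp]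
      rw [h1, h2]
    · have he' : PySem.Str.isIn "-->" l = false := by
        cases h : PySem.Str.isIn "-->" l
        · rfl
        · exact absurd h he
      have hie : pvIsEdge l = false := he'
      by_cases hn : pvIsNode l = true
      · -- node-definition line: unconditional insert = label overwrite + one snoc
        have hg : PySem.Str.isIn "graph" l = false := by
          cases h : PySem.Str.isIn "graph" l
          · rfl
          · exfalso; unfold pvIsNode at hn; rw [he', h] at hn; simp at hn
        have hb : PySem.Str.isIn "[" l = true := by
          cases h : PySem.Str.isIn "[" l
          · exfalso; unfold pvIsNode at hn; rw [he', hg, h] at hn; simp at hn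
          · rfl
        have h2 : ((PySem.Str.split? l "[").getD []).length = 2 := by
          rcases hpre l (List.mem_append_right _ (by simp)) with h | h | h | h
          · exact absurd h he
          · exact absurd h (by rw [hg]; simp)
          · exact absurd hb h
          · exact h
        rw [pvStepA_node _ _ he' hg hb h2, hn, hie]
        simp only [Bool.false_eq_true, if_false, if_true, List.append_nil]
        rw [show pvKeysOf l = [(pvNodeDef l).1] from by
          unfold pvKeysOf; rw [hie, hn]; rfl]
        rw [pvBuild_insert]
      · -- neither edge nor node definition: the line contributes nothing
        have hn' : pvIsNode l = false := by
          cases h : pvIsNode l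
          · rfl
          · exact absurd h hn
        have hskip : PySem.Str.isIn "graph" l = true ∨ PySem.Str.isIn "[" l = false := by
          cases hg : PySem.Str.isIn "graph" l
          · cases hb : PySem.Str.isIn "[" l
            · exact Or.inr rfl
            · exfalso; unfold pvIsNode at hn'; rw [he', hg, hb] at hn'; simp at hn'
          · exact Or.inl rfl
        rw [pvStepA_skip _ _ he' hskip, hn', hie]
        simp only [Bool.false_eq_true, if_false, List.append_nil]
        rw [show pvKeysOf l = [] from by unfold pvKeysOf; rw [hie, hn']; rfl]
        rw [List.append_nil]

-- ===== VERDICT (by name: the statement is the Claim_ definition above) =====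
set_option maxHeartbeats 1000000 in
theorem parse_mermaid_spec : Claim_equal_parse_mermaid := by
  intro input_text _ hpre
  unfold Spec_parse_mermaid parse_mermaid parse_mermaid_alt
  have h := pvMain ((PySem.Str.split? (PySem.Str.strip input_text) "\n").getD [])
    (by intro l hl; exact hpre l hl)
  exact congrArg (fun st => (st.1.items, st.2)) h
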